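-- pv_equiv track=rewrite | github.com/mpmiszczyk/automat | src/CellularAutoma.py | number_to_cells
-- ===== SOURCE A (Python) =====
-- def number_to_cells ( number):
--    cell_values = [False, True]
--    i = 0
--
--    for first in cell_values:
--       for second in cell_values:
--          for third in cell_values:
--             if number == i:
--                return [first, second, third]
--             i += 1
--
--    return [False, False, False]
-- ===== SOURCE B (Python) =====
-- def number_to_cells(number):
--     if number in (0, 1, 2, 3, 4, 5, 6, 7):
--         n = int(number)
--         return [bool(n & 4), bool(n & 2), bool(n & 1)]
--     return [False, False, False]
-- ===== Notes on version B (the rewrite author's own statement) =====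
-- stated objective: simpler
-- what changed: Replaces the triple nested loop enumerating every boolean triple with a direct bit-extraction of the three bits of the number (MSB first), guarded by a range check.
import Mathlib
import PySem

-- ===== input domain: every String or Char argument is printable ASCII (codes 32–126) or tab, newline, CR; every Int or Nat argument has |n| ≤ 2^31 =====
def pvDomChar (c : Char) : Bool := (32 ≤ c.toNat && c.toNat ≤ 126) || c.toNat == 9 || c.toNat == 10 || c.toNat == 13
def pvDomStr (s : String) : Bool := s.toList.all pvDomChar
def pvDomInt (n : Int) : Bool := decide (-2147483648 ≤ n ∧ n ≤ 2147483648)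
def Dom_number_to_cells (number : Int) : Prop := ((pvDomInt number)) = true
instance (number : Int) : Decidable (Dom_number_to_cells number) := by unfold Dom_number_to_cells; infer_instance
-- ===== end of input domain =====

-- B replaces A's triple nested enumeration of all 8 triples with direct bit extraction (simpler).

-- ===== PORT A =====
-- A's nested loops with early return: state is (counter i, optional early-return value).
def number_to_cells_step (number : Int) (st : Int × Option (List Bool))
    (first second third : Bool) : Int × Option (List Bool) :=
  match st with
  | (i, some r) => (i, some r)
  | (i, none) => if number == i then (i, some [first, second, third]) else (i + 1, none)

def number_to_cells (number : Int) : List Bool :=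
  let cell_values := [false, true]
  let res := cell_values.foldl (fun st first =>
    cell_values.foldl (fun st second =>
      cell_values.foldl (fun st third =>
        number_to_cells_step number st first second third) st) st) (0, none)
  match res.2 with
  | some r => r
  | none => [false, false, false]

-- ===== PORT B =====
def number_to_cells_alt (number : Int) : List Bool :=
  if 0 ≤ number ∧ number ≤ 7 then
    [Int.land number 4 != 0, Int.land number 2 != 0, Int.land number 1 != 0]
  else
    [false, false, false]

-- ===== PRECONDITION & SPEC =====
def Spec_number_to_cells (number : Int) (out : List Bool) : Prop := out = number_to_cells_alt number
instance (number : Int) (out : List Bool) : Decidable (Spec_number_to_cells number out) := by unfold Spec_number_to_cells; infer_instance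

-- ===== CLAIM (what is proved, stated in full; the proofs are below) =====
def Claim_equal_number_to_cells : Prop := ∀ (number : Int), Dom_number_to_cells number → Spec_number_to_cells number (number_to_cells number)

-- ===== LEMMAS AND PROOFS =====

-- ===== VERDICT (by name: the statement is the Claim_ definition above) =====
theorem number_to_cells_spec : Claim_equal_number_to_cells := by
  intro number _
  unfold Spec_number_to_cells number_to_cells number_to_cells_alt number_to_cells_step
  by_cases h : 0 ≤ number ∧ number ≤ 7
  · obtain ⟨h0, h7⟩ := h
    interval_cases number <;> decide
  · simp only [List.foldl]
    have e0 : (number == (0:Int)) = false := by simp; omega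
    have e1 : (number == (1:Int)) = false := by simp; omega
    have e2 : (number == (2:Int)) = false := by simp; omega
    have e3 : (number == (3:Int)) = false := by simp; omega
    have e4 : (number == (4:Int)) = false := by simp; omega
    have e5 : (number == (5:Int)) = false := by simp; omega
    have e6 : (number == (6:Int)) = false := by simp; omega
    have e7 : (number == (7:Int)) = false := by simp; omega
    norm_num [e0, e1, e2, e3, e4, e5, e6, e7, h]
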